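-- pv_equiv track=rewrite | github.com/KsdEnjoyer/bio_inf_1 | bio_inf.py | slidingwindow_len
-- ===== SOURCE A (Python) =====
-- def slidingwindow_len(sequence: str, quality: str, window: int = 5, required_quality: int = 30) -> int | None:
--     quals = [
--         0 if base == "N" else (ord(qchar) - 33)
--         for base, qchar in zip(sequence, quality)
--     ]
--     if len(quals) < window:
--         return None
--     required_total = required_quality * window
--     total = sum(quals[:window])
--     if total < required_total:
--         return None
--     len_to_keep = len(quals)
--     for i in range(0, len(quals) - window):
--         total = total - quals[i] + quals[i + window]
--         if total < required_total:
--             len_to_keep = i + window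
--             break
--     i = len_to_keep
--     while i > 1 and quals[i - 1] < required_quality:
--         i -= 1
--     if i < 1:
--         return None
--     return i
-- ===== SOURCE B (Python) =====
-- def slidingwindow_len(sequence: str, quality: str, window: int = 5, required_quality: int = 30) -> int | None:
--     quals = [
--         0 if base == "N" else (ord(qchar) - 33)
--         for base, qchar in zip(sequence, quality)
--     ]
--     n = len(quals)
--     if n < window:
--         return None
--     # prefix sums: pref[k] = sum of the first k qualities
--     pref = [0]
--     for v in quals:
--         pref.append(pref[-1] + v)
--     need = required_quality * window
--     stop = None  # first window start whose sum is below the threshold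
--     for s in range(0, n - window + 1):
--         if pref[s + window] - pref[s] < need:
--             stop = s
--             break
--     if stop == 0:
--         return None
--     keep = n if stop is None else stop + window - 1
--     # trim trailing low-quality bases: first good position searching downward
--     i = keep
--     for j in range(keep, 0, -1):
--         if j == 1 or quals[j - 1] >= required_quality:
--             i = j
--             break
--     return i if i >= 1 else None
-- ===== Notes on version B (the rewrite author's own statement) =====
-- stated objective: alternative
-- what changed: Replaces A's incremental rolling window total (seed sum + subtract/add update loop with a separate window-0 check) by a prefix-sum array over which every window sum is a difference, a single uniform scan over all window starts (start 0 included), and a downward for/break search replacing the trailing while-decrement trim.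
-- outside the precondition, e.g. on slidingwindow_len('1', '', -3, -3): A returns None, B raises IndexError; on slidingwindow_len('AAAA', 'IIII', -2, 0): A raises IndexError, B returns None; on slidingwindow_len('AAAA', '!!!!', -2, -10): A returns None, B returns None
import Mathlib
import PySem

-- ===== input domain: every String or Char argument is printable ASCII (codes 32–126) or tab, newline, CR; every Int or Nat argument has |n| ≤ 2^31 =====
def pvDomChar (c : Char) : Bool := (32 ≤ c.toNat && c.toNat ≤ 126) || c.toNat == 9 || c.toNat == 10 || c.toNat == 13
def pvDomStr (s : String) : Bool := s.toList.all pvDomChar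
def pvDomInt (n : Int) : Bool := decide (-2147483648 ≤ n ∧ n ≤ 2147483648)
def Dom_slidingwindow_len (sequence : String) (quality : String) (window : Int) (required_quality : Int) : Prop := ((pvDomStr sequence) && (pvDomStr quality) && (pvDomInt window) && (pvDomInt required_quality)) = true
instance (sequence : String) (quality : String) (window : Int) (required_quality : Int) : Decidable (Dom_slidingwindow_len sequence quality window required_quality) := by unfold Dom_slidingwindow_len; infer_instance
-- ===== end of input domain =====

-- B replaces A's rolling window total by a prefix-sum array (window sums as differences,
-- one uniform scan over all starts) and the trailing while-trim by a downward for/break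
-- search; same cost, alternative structure. Return value only; nothing is mutated.

-- ===== PORT A =====
-- shared helper: the identical quality-list comprehension at the top of Source A and Source B
def pvQuals (sequence : String) (quality : String) : List Int :=
  (sequence.toList.zip quality.toList).map
    (fun bq => if bq.1 = 'N' then 0 else (bq.2.toNat : Int) - 33)

-- 'for i in range(0, len(quals) - window): total = total - quals[i] + quals[i+window]; …'
-- (indices are Nat; exact for 0 ≤ window, i.e. inside Pre_, where every access is in range)
def pvLoopA (q : List Int) (rt : Int) (w : Nat) : Nat → Nat → Int → Int → Int
  | 0, _, _, ltk => ltk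
  | k+1, i, total, ltk =>
      let t := total - q.getD i 0 + q.getD (i + w) 0
      if t < rt then (i : Int) + (w : Int) else pvLoopA q rt w k (i+1) t ltk

-- 'while i > 1 and quals[i-1] < required_quality: i -= 1'  (index exact since i > 1 there)
def pvTrimA (q : List Int) (rq : Int) (i : Int) : Int :=
  if h : 1 < i ∧ q.getD (i - 1).toNat 0 < rq then pvTrimA q rq (i - 1) else i
  termination_by i.toNat
  decreasing_by omega

def slidingwindow_len (sequence : String) (quality : String) (window : Int) (required_quality : Int) : Option Int :=
  let q := pvQuals sequence quality
  if (q.length : Int) < window then none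
  else
    let w := window.toNat          -- exact for 0 ≤ window (Pre_)
    let rt := required_quality * window
    let total := (q.take w).sum    -- sum(quals[:window]), exact for 0 ≤ window
    if total < rt then none
    else
      let i := pvTrimA q required_quality (pvLoopA q rt w (q.length - w) 0 total (q.length : Int))
      if i < 1 then none else some i

-- ===== PORT B =====
-- 'pref = [0]; for v in quals: pref.append(pref[-1] + v)'
def pvPref : List Int → Int → List Int
  | [], acc => [acc]
  | v :: rest, acc => acc :: pvPref rest (acc + v)

-- 'for s in range(0, n - window + 1): if pref[s+window] - pref[s] < need: stop = s; break'
-- (Nat indices; exact for 0 ≤ window, where every access is in range)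
def pvFindB (pref : List Int) (need : Int) (w : Nat) : Nat → Nat → Option Int
  | 0, _ => none
  | k+1, s =>
      if pref.getD (s + w) 0 - pref.getD s 0 < need then some (s : Int)
      else pvFindB pref need w k (s+1)

-- 'i = keep; for j in range(keep, 0, -1): if j == 1 or quals[j-1] >= required_quality: i = j; break'
-- (index exact since every j in the range satisfies j ≥ 1)
def pvTrimB (q : List Int) (rq : Int) (fb : Int) : List Int → Int
  | [] => fb
  | j :: rest => if j = 1 ∨ rq ≤ q.getD (j - 1).toNat 0 then j else pvTrimB q rq fb rest

def slidingwindow_len_alt (sequence : String) (quality : String) (window : Int) (required_quality : Int) : Option Int :=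
  let q := pvQuals sequence quality
  let n := q.length
  if (n : Int) < window then none
  else
    let w := window.toNat          -- exact for 0 ≤ window (Pre_)
    let pref := pvPref q 0
    let need := required_quality * window
    let stop := pvFindB pref need w (n - w + 1) 0
    if stop = some 0 then none
    else
      let keep : Int := match stop with | none => (n : Int) | some s => s + window - 1
      let i := pvTrimB q required_quality keep (PySem.List.pyRange keep 0 (-1))
      if 1 ≤ i then some i else none

-- ===== PRECONDITION & SPEC =====
-- Pre_ excludes negative window: there A indexes quals with negative offsets, so its result
-- relies on Python's negative-index wraparound and it raises IndexError on most such inputs.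
def Pre_slidingwindow_len (sequence : String) (quality : String) (window : Int) (required_quality : Int) : Prop :=
  0 ≤ window
instance (sequence : String) (quality : String) (window : Int) (required_quality : Int) : Decidable (Pre_slidingwindow_len sequence quality window required_quality) := by unfold Pre_slidingwindow_len; infer_instance

def pvWitness_slidingwindow_len : String × String × Int × Int := ("ACGT", "IIII", 2, 30)

def Spec_slidingwindow_len (sequence : String) (quality : String) (window : Int) (required_quality : Int) (out : Option Int) : Prop := out = slidingwindow_len_alt sequence quality window required_quality
instance (sequence : String) (quality : String) (window : Int) (required_quality : Int) (out : Option Int) : Decidable (Spec_slidingwindow_len sequence quality window required_quality out) := by unfold Spec_slidingwindow_len; infer_instance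

-- ===== CLAIM (what is proved, stated in full; the proofs are below) =====
def Claim_equal_slidingwindow_len : Prop := ∀ (sequence : String) (quality : String) (window : Int) (required_quality : Int), Dom_slidingwindow_len sequence quality window required_quality → Pre_slidingwindow_len sequence quality window required_quality → Spec_slidingwindow_len sequence quality window required_quality (slidingwindow_len sequence quality window required_quality)

-- ===== LEMMAS AND PROOFS =====

-- pref[k] is the sum of the first k qualities
theorem pvPref_getD (q : List Int) (acc : Int) (k : Nat) (hk : k ≤ q.length) :
    (pvPref q acc).getD k 0 = acc + (q.take k).sum := by
  induction q generalizing acc k with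
  | nil =>
    have : k = 0 := by simpa using hk
    subst this; simp [pvPref]
  | cons v rest ih =>
    cases k with
    | zero => simp [pvPref]
    | succ k =>
      simp only [pvPref, List.getD, List.getElem?_cons_succ, List.take_succ_cons, List.sum_cons]
      have := ih (acc + v) k (by simpa using hk)
      simp only [List.getD] at this
      rw [this]; ring

-- a window sum as a difference of prefix sums
theorem pvWindowSum (q : List Int) (w s : Nat) (h : s + w ≤ q.length) :
    (pvPref q 0).getD (s + w) 0 - (pvPref q 0).getD s 0 = ((q.drop s).take w).sum := by
  rw [pvPref_getD q 0 (s + w) h, pvPref_getD q 0 s (by omega)]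
  rw [List.take_add, List.sum_append]; ring

-- one rolling-sum update slides the window by one
theorem pvSlide (q : List Int) (w i : Nat) (h : i + w < q.length) :
    ((q.drop i).take w).sum - q.getD i 0 + q.getD (i + w) 0 = ((q.drop (i+1)).take w).sum := by
  have key : ∀ s : Nat, s + w ≤ q.length →
      ((q.drop s).take w).sum = (q.take (s + w)).sum - (q.take s).sum := by
    intro s hs
    rw [List.take_add, List.sum_append]; ring
  have hgd : ∀ j : Nat, j < q.length → q.getD j 0 = (q.take (j+1)).sum - (q.take j).sum := by
    intro j hj
    have : q.take (j+1) = q.take j ++ [q[j]] := by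
      rw [List.take_add_one]; simp [List.getElem?_eq_getElem hj]
    rw [this, List.sum_append, List.getD, List.getElem?_eq_getElem hj]
    simp
  rw [key i (by omega), key (i+1) (by omega), hgd i (by omega), hgd (i+w) h]
  have : i + 1 + w = i + w + 1 := by omega
  rw [this]; ring

-- A's break loop returns exactly what B's prefix-difference scan determines
theorem pvLoop_corr (q : List Int) (rt : Int) (w : Nat) :
    ∀ (k i : Nat), i + k + w = q.length →
    pvLoopA q rt w k i (((q.drop i).take w).sum) (q.length : Int)
      = (match pvFindB (pvPref q 0) rt w k (i+1) with
         | none => (q.length : Int)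
         | some s => s + (w : Int) - 1) := by
  intro k
  induction k with
  | zero => intro i _; simp [pvLoopA, pvFindB]
  | succ k ih =>
    intro i hi
    have hlt : i + w < q.length := by omega
    simp only [pvLoopA, pvFindB]
    rw [pvSlide q w i hlt, pvWindowSum q w (i+1) (by omega)]
    by_cases hc : ((q.drop (i+1)).take w).sum < rt
    · simp only [if_pos hc]
      push_cast; ring
    · simp only [if_neg hc]
      have := ih (i+1) (by omega)
      rw [this]

-- pvFindB never returns an index below its starting point
theorem pvFindB_ge (pref : List Int) (need : Int) (w : Nat) :
    ∀ (k s : Nat) (t : Int), pvFindB pref need w k s = some t → (s : Int) ≤ t := by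
  intro k
  induction k with
  | zero => intro s t h; simp [pvFindB] at h
  | succ k ih =>
    intro s t h
    simp only [pvFindB] at h
    split_ifs at h with hc
    · injection h with h'; omega
    · have := ih (s+1) t h
      push_cast at this ⊢; omega

-- the downward for/break search equals the while-decrement trim (for i ≥ 1)
theorem pvTrim_corr (q : List Int) (rq : Int) :
    ∀ (k : Nat) (i fb : Int), 1 ≤ i → i ≤ (k : Int) →
    pvTrimA q rq i = pvTrimB q rq fb (PySem.List.pyRange i 0 (-1)) := by
  intro k
  induction k with
  | zero => intro i fb h1 h2; omega
  | succ k ih =>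
    intro i fb h1 hik
    rw [PySem.List.pyRange_neg_one_cons (by omega)]
    rw [pvTrimA]
    by_cases hc : 1 < i ∧ q.getD (i - 1).toNat 0 < rq
    · rw [dif_pos hc]
      simp only [pvTrimB]
      have hcond : ¬ (i = 1 ∨ rq ≤ q.getD (i - 1).toNat 0) := by
        rintro (h' | h') <;> omega
      rw [if_neg hcond]
      exact ih (i - 1) fb (by omega) (by omega)
    · rw [dif_neg hc]
      simp only [pvTrimB]
      have hcond : i = 1 ∨ rq ≤ q.getD (i - 1).toNat 0 := by
        by_contra hno
        rw [not_or] at hno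
        exact hc ⟨by omega, by omega⟩
      rw [if_pos hcond]

theorem pvTrim_eq (q : List Int) (rq : Int) (i : Int) :
    pvTrimA q rq i = pvTrimB q rq i (PySem.List.pyRange i 0 (-1)) := by
  by_cases h : 1 ≤ i
  · exact pvTrim_corr q rq i.toNat i i h (by omega)
  · rw [PySem.List.pyRange_neg_one_eq_nil (by omega)]
    rw [pvTrimA]
    have hc : ¬ (1 < i ∧ q.getD (i - 1).toNat 0 < rq) := by
      intro hh; omega
    rw [dif_neg hc]
    rfl

-- ===== VERDICT (by name: the statement is the Claim_ definition above) =====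
theorem slidingwindow_len_spec : Claim_equal_slidingwindow_len := by
  intro sequence quality window required_quality _ hpre
  unfold Spec_slidingwindow_len slidingwindow_len slidingwindow_len_alt
  simp only []
  set q := pvQuals sequence quality with hq
  by_cases hg : (q.length : Int) < window
  · simp [hg]
  · simp only [if_neg hg]
    have hpre' : 0 ≤ window := hpre
    have hwi : (window.toNat : Int) = window := Int.toNat_of_nonneg hpre'
    set w := window.toNat with hw
    have hwn : w ≤ q.length := by omega
    have hfuel : q.length - w + 1 = (q.length - w) + 1 := rfl
    rw [hfuel]
    simp only [pvFindB]
    rw [pvWindowSum q w 0 (by omega)]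
    simp only [Nat.zero_add, List.drop_zero] at *
    by_cases hc0 : (q.take w).sum < required_quality * window
    · rw [if_pos hc0, if_pos hc0]
      simp
    · rw [if_neg hc0, if_neg hc0]
      have hcorr := pvLoop_corr q (required_quality * window) w (q.length - w) 0 (by omega)
      simp only [List.drop_zero, Nat.zero_add] at hcorr
      rw [hcorr]
      cases hstop : pvFindB (pvPref q 0) (required_quality * window) w (q.length - w) 1 with
      | none =>
        simp only [hstop]
        rw [pvTrim_eq q required_quality (q.length : Int)]
        split_ifs with h1 h2 h2 <;> first | rfl | omega
      | some s =>
        have hs1 : (1 : Int) ≤ s := pvFindB_ge _ _ _ _ _ _ hstop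
        simp only [hstop]
        have hne : (some s : Option Int) ≠ some 0 := by
          intro h; injection h with h'; omega
        rw [if_neg hne]
        have : s + (w : Int) - 1 = s + window - 1 := by rw [hwi]
        rw [this]
        rw [pvTrim_eq q required_quality (s + window - 1)]
        split_ifs with h1 h2 h2 <;> first | rfl | omega
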